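-- pv_equiv track=rewrite | github.com/wifientist/rtools2 | api/routers/per_unit_ssid/phases/configure_lan_ports.py | has_configurable_ports
-- ===== SOURCE A (Python) =====
-- MODEL_PORT_COUNTS = {
--     # 1-port models with LAN1 as uplink (LAN2 is configurable)
--     "R500": 1,
--     "R510": 1,
--     "R600": 1,
--     "R610": 1,
--     "R710": 1,
--     "T610": 1,
--     "T610S": 1,
--     "T710": 1,
--     "T710S": 1,
--     # 1-port models with LAN2 as uplink (LAN1 is configurable)
--     "R550": 1,
--     "R560": 1,
--     "R575": 1,
--     "R650": 1,
--     "R670": 1,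
--     "R720": 1,
--     "R730": 1,
--     "R750": 1,
--     "R760": 1,
--     "R770": 1,
--     "R850": 1,
--     "T350": 1,
--     "T670": 1,
--     "T670SN": 1,
--     # 2-port models (LAN1, LAN2 configurable; LAN3 is uplink)
--     "H320": 2,
--     "H350": 2,
--     "T750": 2,
--     "T750SE": 2,
--     # 4-port models (LAN1-4 configurable; LAN5 is uplink)
--     "H510": 4,
--     "H550": 4,
--     "H670": 4,
-- }
--
-- def has_configurable_ports(model: str) -> bool:
--     """Check if AP model has configurable LAN ports"""
--     if not model:
--         return False
--     # Check if model is in our port count mapping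
--     model_upper = model.upper()
--     for model_prefix in MODEL_PORT_COUNTS.keys():
--         if model_upper.startswith(model_prefix.upper()):
--             return True
--     return False
-- ===== SOURCE B (Python) =====
-- # Prefixes grouped by length: a few slice+set lookups instead of scanning every prefix.
-- _PREFIX_SETS = {
--     4: {"R500", "R510", "R600", "R610", "R710", "T610", "T710",
--         "R550", "R560", "R575", "R650", "R670", "R720", "R730",
--         "R750", "R760", "R770", "R850", "T350", "T670",
--         "H320", "H350", "T750", "H510", "H550", "H670"},
--     5: {"T610S", "T710S"},
--     6: {"T670SN", "T750SE"},
-- }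
--
-- def has_configurable_ports(model: str) -> bool:
--     """Check if AP model has configurable LAN ports"""
--     if not model:
--         return False
--     model_upper = model.upper()
--     return any(model_upper[:n] in s for n, s in _PREFIX_SETS.items())
-- ===== Notes on version B (the rewrite author's own statement) =====
-- stated objective: alternative
-- what changed: Replaces the scan over all 31 prefixes with startswith by a length-indexed table: for each distinct prefix length (4, 5, 6) one slice of the uppercased model is looked up in a set of prefixes of that length.
import Mathlib
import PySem

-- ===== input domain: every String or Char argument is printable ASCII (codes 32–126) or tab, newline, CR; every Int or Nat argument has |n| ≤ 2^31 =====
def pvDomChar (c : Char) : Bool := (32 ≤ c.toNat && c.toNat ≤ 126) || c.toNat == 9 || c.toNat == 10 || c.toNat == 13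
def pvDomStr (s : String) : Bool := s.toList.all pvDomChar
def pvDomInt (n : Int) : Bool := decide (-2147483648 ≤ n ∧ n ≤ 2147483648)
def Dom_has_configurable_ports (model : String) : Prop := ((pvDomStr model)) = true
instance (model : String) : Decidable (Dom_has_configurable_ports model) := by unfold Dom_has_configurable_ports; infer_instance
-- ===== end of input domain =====

-- B groups the prefixes by length and tests one slice per length against a set; return value only.

-- ===== PORT A =====
def MODEL_PORT_COUNTS : PySem.Dict String Int := PySem.Dict.ofList
  [("R500", 1), ("R510", 1), ("R600", 1), ("R610", 1), ("R710", 1), ("T610", 1),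
   ("T610S", 1), ("T710", 1), ("T710S", 1), ("R550", 1), ("R560", 1), ("R575", 1),
   ("R650", 1), ("R670", 1), ("R720", 1), ("R730", 1), ("R750", 1), ("R760", 1),
   ("R770", 1), ("R850", 1), ("T350", 1), ("T670", 1), ("T670SN", 1), ("H320", 2),
   ("H350", 2), ("T750", 2), ("T750SE", 2), ("H510", 4), ("H550", 4), ("H670", 4)]

def has_configurable_ports (model : String) : Bool :=
  if model == "" then false
  else
    let model_upper := PySem.Str.upper model
    (PySem.Dict.keys MODEL_PORT_COUNTS).any
      (fun model_prefix => PySem.Str.startswith model_upper (PySem.Str.upper model_prefix))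

-- ===== PORT B =====
def PREFIX_SETS : PySem.Dict Int (PySem.Set String) := PySem.Dict.ofList
  [((4 : Int), PySem.Set.ofList
      ["R500", "R510", "R600", "R610", "R710", "T610", "T710",
       "R550", "R560", "R575", "R650", "R670", "R720", "R730",
       "R750", "R760", "R770", "R850", "T350", "T670",
       "H320", "H350", "T750", "H510", "H550", "H670"]),
   ((5 : Int), PySem.Set.ofList ["T610S", "T710S"]),
   ((6 : Int), PySem.Set.ofList ["T670SN", "T750SE"])]

def has_configurable_ports_alt (model : String) : Bool :=
  if model == "" then false
  else
    let model_upper := PySem.Str.upper model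
    PREFIX_SETS.items.any
      (fun ns => PySem.Set.contains ns.2 (PySem.Str.slice model_upper none (some ns.1)))

-- ===== PRECONDITION & SPEC =====
def Spec_has_configurable_ports (model : String) (out : Bool) : Prop := out = has_configurable_ports_alt model
instance (model : String) (out : Bool) : Decidable (Spec_has_configurable_ports model out) := by unfold Spec_has_configurable_ports; infer_instance

-- ===== CLAIM (what is proved, stated in full; the proofs are below) =====
def Claim_equal_has_configurable_ports : Prop := ∀ (model : String), Dom_has_configurable_ports model → Spec_has_configurable_ports model (has_configurable_ports model)



-- ===== LEMMAS AND PROOFS =====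
theorem sw_take (s p : List Char) : PySem.Chars.startswith s p = (p == s.take p.length) := by
  rw [Bool.eq_iff_iff]
  simp [PySem.Chars.startswith_iff, List.prefix_iff_eq_take]

theorem swS (s p : String) : PySem.Str.startswith s p = (p.toList == s.toList.take p.toList.length) := by
  simp only [PySem.Str.startswith_eq, sw_take]

theorem beq_toList (s t : String) : (s == t) = (t.toList == s.toList) := by
  rw [Bool.eq_iff_iff]
  simp only [beq_iff_eq]
  constructor
  · intro h; rw [h]
  · intro h; exact String.ext h.symm

theorem pv_slice4 (xs : List Char) : PySem.List.slice xs none (some (4 : Int)) = xs.take 4 := by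
  rw [PySem.List.slice_to xs (by norm_num)]; rfl

theorem pv_slice5 (xs : List Char) : PySem.List.slice xs none (some (5 : Int)) = xs.take 5 := by
  rw [PySem.List.slice_to xs (by norm_num)]; rfl

theorem pv_slice6 (xs : List Char) : PySem.List.slice xs none (some (6 : Int)) = xs.take 6 := by
  rw [PySem.List.slice_to xs (by norm_num)]; rfl

set_option maxHeartbeats 2000000 in
theorem pv_main (m : String) : has_configurable_ports m = has_configurable_ports_alt m := by
  unfold has_configurable_ports has_configurable_ports_alt
  by_cases h : m = ""
  · simp [h]
  · simp only [beq_iff_eq, if_neg h]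
    rw [show PySem.Dict.keys MODEL_PORT_COUNTS = ["R500", "R510", "R600", "R610", "R710", "T610", "T610S", "T710", "T710S", "R550", "R560", "R575", "R650", "R670", "R720", "R730", "R750", "R760", "R770", "R850", "T350", "T670", "T670SN", "H320", "H350", "T750", "T750SE", "H510", "H550", "H670"] from rfl,
        show PREFIX_SETS.items = [((4:Int), (["R500", "R510", "R600", "R610", "R710", "T610", "T710", "R550", "R560", "R575", "R650", "R670", "R720", "R730", "R750", "R760", "R770", "R850", "T350", "T670", "H320", "H350", "T750", "H510", "H550", "H670"] : List String)), ((5:Int), ["T610S", "T710S"]), ((6:Int), ["T670SN", "T750SE"])] from rfl]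
    simp only [List.any_cons, List.any_nil, swS, PySem.Set.contains_eq_listContains,
      List.contains_eq_any_beq, beq_toList, PySem.Str.toList_slice, PySem.Chars.slice_eq_listSlice,
      pv_slice4, pv_slice5, pv_slice6,
      show (PySem.Str.upper "H320").toList = ['H', '3', '2', '0'] from rfl,
      show ("H320" : String).toList = ['H', '3', '2', '0'] from rfl,
      show (['H', '3', '2', '0'] : List Char).length = 4 from rfl,
      show (PySem.Str.upper "H350").toList = ['H', '3', '5', '0'] from rfl,
      show ("H350" : String).toList = ['H', '3', '5', '0'] from rfl,
      show (['H', '3', '5', '0'] : List Char).length = 4 from rfl,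
      show (PySem.Str.upper "H510").toList = ['H', '5', '1', '0'] from rfl,
      show ("H510" : String).toList = ['H', '5', '1', '0'] from rfl,
      show (['H', '5', '1', '0'] : List Char).length = 4 from rfl,
      show (PySem.Str.upper "H550").toList = ['H', '5', '5', '0'] from rfl,
      show ("H550" : String).toList = ['H', '5', '5', '0'] from rfl,
      show (['H', '5', '5', '0'] : List Char).length = 4 from rfl,
      show (PySem.Str.upper "H670").toList = ['H', '6', '7', '0'] from rfl,
      show ("H670" : String).toList = ['H', '6', '7', '0'] from rfl,
      show (['H', '6', '7', '0'] : List Char).length = 4 from rfl,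
      show (PySem.Str.upper "R500").toList = ['R', '5', '0', '0'] from rfl,
      show ("R500" : String).toList = ['R', '5', '0', '0'] from rfl,
      show (['R', '5', '0', '0'] : List Char).length = 4 from rfl,
      show (PySem.Str.upper "R510").toList = ['R', '5', '1', '0'] from rfl,
      show ("R510" : String).toList = ['R', '5', '1', '0'] from rfl,
      show (['R', '5', '1', '0'] : List Char).length = 4 from rfl,
      show (PySem.Str.upper "R550").toList = ['R', '5', '5', '0'] from rfl,
      show ("R550" : String).toList = ['R', '5', '5', '0'] from rfl,
      show (['R', '5', '5', '0'] : List Char).length = 4 from rfl,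
      show (PySem.Str.upper "R560").toList = ['R', '5', '6', '0'] from rfl,
      show ("R560" : String).toList = ['R', '5', '6', '0'] from rfl,
      show (['R', '5', '6', '0'] : List Char).length = 4 from rfl,
      show (PySem.Str.upper "R575").toList = ['R', '5', '7', '5'] from rfl,
      show ("R575" : String).toList = ['R', '5', '7', '5'] from rfl,
      show (['R', '5', '7', '5'] : List Char).length = 4 from rfl,
      show (PySem.Str.upper "R600").toList = ['R', '6', '0', '0'] from rfl,
      show ("R600" : String).toList = ['R', '6', '0', '0'] from rfl,
      show (['R', '6', '0', '0'] : List Char).length = 4 from rfl,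
      show (PySem.Str.upper "R610").toList = ['R', '6', '1', '0'] from rfl,
      show ("R610" : String).toList = ['R', '6', '1', '0'] from rfl,
      show (['R', '6', '1', '0'] : List Char).length = 4 from rfl,
      show (PySem.Str.upper "R650").toList = ['R', '6', '5', '0'] from rfl,
      show ("R650" : String).toList = ['R', '6', '5', '0'] from rfl,
      show (['R', '6', '5', '0'] : List Char).length = 4 from rfl,
      show (PySem.Str.upper "R670").toList = ['R', '6', '7', '0'] from rfl,
      show ("R670" : String).toList = ['R', '6', '7', '0'] from rfl,
      show (['R', '6', '7', '0'] : List Char).length = 4 from rfl,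
      show (PySem.Str.upper "R710").toList = ['R', '7', '1', '0'] from rfl,
      show ("R710" : String).toList = ['R', '7', '1', '0'] from rfl,
      show (['R', '7', '1', '0'] : List Char).length = 4 from rfl,
      show (PySem.Str.upper "R720").toList = ['R', '7', '2', '0'] from rfl,
      show ("R720" : String).toList = ['R', '7', '2', '0'] from rfl,
      show (['R', '7', '2', '0'] : List Char).length = 4 from rfl,
      show (PySem.Str.upper "R730").toList = ['R', '7', '3', '0'] from rfl,
      show ("R730" : String).toList = ['R', '7', '3', '0'] from rfl,
      show (['R', '7', '3', '0'] : List Char).length = 4 from rfl,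
      show (PySem.Str.upper "R750").toList = ['R', '7', '5', '0'] from rfl,
      show ("R750" : String).toList = ['R', '7', '5', '0'] from rfl,
      show (['R', '7', '5', '0'] : List Char).length = 4 from rfl,
      show (PySem.Str.upper "R760").toList = ['R', '7', '6', '0'] from rfl,
      show ("R760" : String).toList = ['R', '7', '6', '0'] from rfl,
      show (['R', '7', '6', '0'] : List Char).length = 4 from rfl,
      show (PySem.Str.upper "R770").toList = ['R', '7', '7', '0'] from rfl,
      show ("R770" : String).toList = ['R', '7', '7', '0'] from rfl,
      show (['R', '7', '7', '0'] : List Char).length = 4 from rfl,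
      show (PySem.Str.upper "R850").toList = ['R', '8', '5', '0'] from rfl,
      show ("R850" : String).toList = ['R', '8', '5', '0'] from rfl,
      show (['R', '8', '5', '0'] : List Char).length = 4 from rfl,
      show (PySem.Str.upper "T350").toList = ['T', '3', '5', '0'] from rfl,
      show ("T350" : String).toList = ['T', '3', '5', '0'] from rfl,
      show (['T', '3', '5', '0'] : List Char).length = 4 from rfl,
      show (PySem.Str.upper "T610").toList = ['T', '6', '1', '0'] from rfl,
      show ("T610" : String).toList = ['T', '6', '1', '0'] from rfl,
      show (['T', '6', '1', '0'] : List Char).length = 4 from rfl,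
      show (PySem.Str.upper "T610S").toList = ['T', '6', '1', '0', 'S'] from rfl,
      show ("T610S" : String).toList = ['T', '6', '1', '0', 'S'] from rfl,
      show (['T', '6', '1', '0', 'S'] : List Char).length = 5 from rfl,
      show (PySem.Str.upper "T670").toList = ['T', '6', '7', '0'] from rfl,
      show ("T670" : String).toList = ['T', '6', '7', '0'] from rfl,
      show (['T', '6', '7', '0'] : List Char).length = 4 from rfl,
      show (PySem.Str.upper "T670SN").toList = ['T', '6', '7', '0', 'S', 'N'] from rfl,
      show ("T670SN" : String).toList = ['T', '6', '7', '0', 'S', 'N'] from rfl,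
      show (['T', '6', '7', '0', 'S', 'N'] : List Char).length = 6 from rfl,
      show (PySem.Str.upper "T710").toList = ['T', '7', '1', '0'] from rfl,
      show ("T710" : String).toList = ['T', '7', '1', '0'] from rfl,
      show (['T', '7', '1', '0'] : List Char).length = 4 from rfl,
      show (PySem.Str.upper "T710S").toList = ['T', '7', '1', '0', 'S'] from rfl,
      show ("T710S" : String).toList = ['T', '7', '1', '0', 'S'] from rfl,
      show (['T', '7', '1', '0', 'S'] : List Char).length = 5 from rfl,
      show (PySem.Str.upper "T750").toList = ['T', '7', '5', '0'] from rfl,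
      show ("T750" : String).toList = ['T', '7', '5', '0'] from rfl,
      show (['T', '7', '5', '0'] : List Char).length = 4 from rfl,
      show (PySem.Str.upper "T750SE").toList = ['T', '7', '5', '0', 'S', 'E'] from rfl,
      show ("T750SE" : String).toList = ['T', '7', '5', '0', 'S', 'E'] from rfl,
      show (['T', '7', '5', '0', 'S', 'E'] : List Char).length = 6 from rfl]
    rw [Bool.eq_iff_iff]
    simp only [Bool.or_false, Bool.or_eq_true, beq_iff_eq]
    constructor
    · rintro (h|h|h|h|h|h|h|h|h|h|h|h|h|h|h|h|h|h|h|h|h|h|h|h|h|h|h|h|h|h)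
      exacts [Or.inl (Or.inl h),
      Or.inl (Or.inr (Or.inl h)),
      Or.inl (Or.inr (Or.inr (Or.inl h))),
      Or.inl (Or.inr (Or.inr (Or.inr (Or.inl h)))),
      Or.inl (Or.inr (Or.inr (Or.inr (Or.inr (Or.inl h))))),
      Or.inl (Or.inr (Or.inr (Or.inr (Or.inr (Or.inr (Or.inl h)))))),
      Or.inr (Or.inl (Or.inl h)),
      Or.inl (Or.inr (Or.inr (Or.inr (Or.inr (Or.inr (Or.inr (Or.inl h))))))),
      Or.inr (Or.inl (Or.inr (h))),
      Or.inl (Or.inr (Or.inr (Or.inr (Or.inr (Or.inr (Or.inr (Or.inr (Or.inl h)))))))),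
      Or.inl (Or.inr (Or.inr (Or.inr (Or.inr (Or.inr (Or.inr (Or.inr (Or.inr (Or.inl h))))))))),
      Or.inl (Or.inr (Or.inr (Or.inr (Or.inr (Or.inr (Or.inr (Or.inr (Or.inr (Or.inr (Or.inl h)))))))))),
      Or.inl (Or.inr (Or.inr (Or.inr (Or.inr (Or.inr (Or.inr (Or.inr (Or.inr (Or.inr (Or.inr (Or.inl h))))))))))),
      Or.inl (Or.inr (Or.inr (Or.inr (Or.inr (Or.inr (Or.inr (Or.inr (Or.inr (Or.inr (Or.inr (Or.inr (Or.inl h)))))))))))),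
      Or.inl (Or.inr (Or.inr (Or.inr (Or.inr (Or.inr (Or.inr (Or.inr (Or.inr (Or.inr (Or.inr (Or.inr (Or.inr (Or.inl h))))))))))))),
      Or.inl (Or.inr (Or.inr (Or.inr (Or.inr (Or.inr (Or.inr (Or.inr (Or.inr (Or.inr (Or.inr (Or.inr (Or.inr (Or.inr (Or.inl h)))))))))))))),
      Or.inl (Or.inr (Or.inr (Or.inr (Or.inr (Or.inr (Or.inr (Or.inr (Or.inr (Or.inr (Or.inr (Or.inr (Or.inr (Or.inr (Or.inr (Or.inl h))))))))))))))),
      Or.inl (Or.inr (Or.inr (Or.inr (Or.inr (Or.inr (Or.inr (Or.inr (Or.inr (Or.inr (Or.inr (Or.inr (Or.inr (Or.inr (Or.inr (Or.inr (Or.inl h)))))))))))))))),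
      Or.inl (Or.inr (Or.inr (Or.inr (Or.inr (Or.inr (Or.inr (Or.inr (Or.inr (Or.inr (Or.inr (Or.inr (Or.inr (Or.inr (Or.inr (Or.inr (Or.inr (Or.inl h))))))))))))))))),
      Or.inl (Or.inr (Or.inr (Or.inr (Or.inr (Or.inr (Or.inr (Or.inr (Or.inr (Or.inr (Or.inr (Or.inr (Or.inr (Or.inr (Or.inr (Or.inr (Or.inr (Or.inr (Or.inl h)))))))))))))))))),
      Or.inl (Or.inr (Or.inr (Or.inr (Or.inr (Or.inr (Or.inr (Or.inr (Or.inr (Or.inr (Or.inr (Or.inr (Or.inr (Or.inr (Or.inr (Or.inr (Or.inr (Or.inr (Or.inr (Or.inl h))))))))))))))))))),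
      Or.inl (Or.inr (Or.inr (Or.inr (Or.inr (Or.inr (Or.inr (Or.inr (Or.inr (Or.inr (Or.inr (Or.inr (Or.inr (Or.inr (Or.inr (Or.inr (Or.inr (Or.inr (Or.inr (Or.inr (Or.inl h)))))))))))))))))))),
      Or.inr (Or.inr (Or.inl h)),
      Or.inl (Or.inr (Or.inr (Or.inr (Or.inr (Or.inr (Or.inr (Or.inr (Or.inr (Or.inr (Or.inr (Or.inr (Or.inr (Or.inr (Or.inr (Or.inr (Or.inr (Or.inr (Or.inr (Or.inr (Or.inr (Or.inl h))))))))))))))))))))),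
      Or.inl (Or.inr (Or.inr (Or.inr (Or.inr (Or.inr (Or.inr (Or.inr (Or.inr (Or.inr (Or.inr (Or.inr (Or.inr (Or.inr (Or.inr (Or.inr (Or.inr (Or.inr (Or.inr (Or.inr (Or.inr (Or.inr (Or.inl h)))))))))))))))))))))),
      Or.inl (Or.inr (Or.inr (Or.inr (Or.inr (Or.inr (Or.inr (Or.inr (Or.inr (Or.inr (Or.inr (Or.inr (Or.inr (Or.inr (Or.inr (Or.inr (Or.inr (Or.inr (Or.inr (Or.inr (Or.inr (Or.inr (Or.inr (Or.inl h))))))))))))))))))))))),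
      Or.inr (Or.inr (Or.inr (h))),
      Or.inl (Or.inr (Or.inr (Or.inr (Or.inr (Or.inr (Or.inr (Or.inr (Or.inr (Or.inr (Or.inr (Or.inr (Or.inr (Or.inr (Or.inr (Or.inr (Or.inr (Or.inr (Or.inr (Or.inr (Or.inr (Or.inr (Or.inr (Or.inr (Or.inl h)))))))))))))))))))))))),
      Or.inl (Or.inr (Or.inr (Or.inr (Or.inr (Or.inr (Or.inr (Or.inr (Or.inr (Or.inr (Or.inr (Or.inr (Or.inr (Or.inr (Or.inr (Or.inr (Or.inr (Or.inr (Or.inr (Or.inr (Or.inr (Or.inr (Or.inr (Or.inr (Or.inr (Or.inl h))))))))))))))))))))))))),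
      Or.inl (Or.inr (Or.inr (Or.inr (Or.inr (Or.inr (Or.inr (Or.inr (Or.inr (Or.inr (Or.inr (Or.inr (Or.inr (Or.inr (Or.inr (Or.inr (Or.inr (Or.inr (Or.inr (Or.inr (Or.inr (Or.inr (Or.inr (Or.inr (Or.inr (Or.inr (h))))))))))))))))))))))))))]
    · rintro ((h|h|h|h|h|h|h|h|h|h|h|h|h|h|h|h|h|h|h|h|h|h|h|h|h|h)|(h|h)|(h|h))
      exacts [Or.inl h,
      Or.inr (Or.inl h),
      Or.inr (Or.inr (Or.inl h)),
      Or.inr (Or.inr (Or.inr (Or.inl h))),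
      Or.inr (Or.inr (Or.inr (Or.inr (Or.inl h)))),
      Or.inr (Or.inr (Or.inr (Or.inr (Or.inr (Or.inl h))))),
      Or.inr (Or.inr (Or.inr (Or.inr (Or.inr (Or.inr (Or.inr (Or.inl h))))))),
      Or.inr (Or.inr (Or.inr (Or.inr (Or.inr (Or.inr (Or.inr (Or.inr (Or.inr (Or.inl h))))))))),
      Or.inr (Or.inr (Or.inr (Or.inr (Or.inr (Or.inr (Or.inr (Or.inr (Or.inr (Or.inr (Or.inl h)))))))))),
      Or.inr (Or.inr (Or.inr (Or.inr (Or.inr (Or.inr (Or.inr (Or.inr (Or.inr (Or.inr (Or.inr (Or.inl h))))))))))),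
      Or.inr (Or.inr (Or.inr (Or.inr (Or.inr (Or.inr (Or.inr (Or.inr (Or.inr (Or.inr (Or.inr (Or.inr (Or.inl h)))))))))))),
      Or.inr (Or.inr (Or.inr (Or.inr (Or.inr (Or.inr (Or.inr (Or.inr (Or.inr (Or.inr (Or.inr (Or.inr (Or.inr (Or.inl h))))))))))))),
      Or.inr (Or.inr (Or.inr (Or.inr (Or.inr (Or.inr (Or.inr (Or.inr (Or.inr (Or.inr (Or.inr (Or.inr (Or.inr (Or.inr (Or.inl h)))))))))))))),
      Or.inr (Or.inr (Or.inr (Or.inr (Or.inr (Or.inr (Or.inr (Or.inr (Or.inr (Or.inr (Or.inr (Or.inr (Or.inr (Or.inr (Or.inr (Or.inl h))))))))))))))),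
      Or.inr (Or.inr (Or.inr (Or.inr (Or.inr (Or.inr (Or.inr (Or.inr (Or.inr (Or.inr (Or.inr (Or.inr (Or.inr (Or.inr (Or.inr (Or.inr (Or.inl h)))))))))))))))),
      Or.inr (Or.inr (Or.inr (Or.inr (Or.inr (Or.inr (Or.inr (Or.inr (Or.inr (Or.inr (Or.inr (Or.inr (Or.inr (Or.inr (Or.inr (Or.inr (Or.inr (Or.inl h))))))))))))))))),
      Or.inr (Or.inr (Or.inr (Or.inr (Or.inr (Or.inr (Or.inr (Or.inr (Or.inr (Or.inr (Or.inr (Or.inr (Or.inr (Or.inr (Or.inr (Or.inr (Or.inr (Or.inr (Or.inl h)))))))))))))))))),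
      Or.inr (Or.inr (Or.inr (Or.inr (Or.inr (Or.inr (Or.inr (Or.inr (Or.inr (Or.inr (Or.inr (Or.inr (Or.inr (Or.inr (Or.inr (Or.inr (Or.inr (Or.inr (Or.inr (Or.inl h))))))))))))))))))),
      Or.inr (Or.inr (Or.inr (Or.inr (Or.inr (Or.inr (Or.inr (Or.inr (Or.inr (Or.inr (Or.inr (Or.inr (Or.inr (Or.inr (Or.inr (Or.inr (Or.inr (Or.inr (Or.inr (Or.inr (Or.inl h)))))))))))))))))))),
      Or.inr (Or.inr (Or.inr (Or.inr (Or.inr (Or.inr (Or.inr (Or.inr (Or.inr (Or.inr (Or.inr (Or.inr (Or.inr (Or.inr (Or.inr (Or.inr (Or.inr (Or.inr (Or.inr (Or.inr (Or.inr (Or.inl h))))))))))))))))))))),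
      Or.inr (Or.inr (Or.inr (Or.inr (Or.inr (Or.inr (Or.inr (Or.inr (Or.inr (Or.inr (Or.inr (Or.inr (Or.inr (Or.inr (Or.inr (Or.inr (Or.inr (Or.inr (Or.inr (Or.inr (Or.inr (Or.inr (Or.inr (Or.inl h))))))))))))))))))))))),
      Or.inr (Or.inr (Or.inr (Or.inr (Or.inr (Or.inr (Or.inr (Or.inr (Or.inr (Or.inr (Or.inr (Or.inr (Or.inr (Or.inr (Or.inr (Or.inr (Or.inr (Or.inr (Or.inr (Or.inr (Or.inr (Or.inr (Or.inr (Or.inr (Or.inl h)))))))))))))))))))))))),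
      Or.inr (Or.inr (Or.inr (Or.inr (Or.inr (Or.inr (Or.inr (Or.inr (Or.inr (Or.inr (Or.inr (Or.inr (Or.inr (Or.inr (Or.inr (Or.inr (Or.inr (Or.inr (Or.inr (Or.inr (Or.inr (Or.inr (Or.inr (Or.inr (Or.inr (Or.inl h))))))))))))))))))))))))),
      Or.inr (Or.inr (Or.inr (Or.inr (Or.inr (Or.inr (Or.inr (Or.inr (Or.inr (Or.inr (Or.inr (Or.inr (Or.inr (Or.inr (Or.inr (Or.inr (Or.inr (Or.inr (Or.inr (Or.inr (Or.inr (Or.inr (Or.inr (Or.inr (Or.inr (Or.inr (Or.inr (Or.inl h))))))))))))))))))))))))))),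
      Or.inr (Or.inr (Or.inr (Or.inr (Or.inr (Or.inr (Or.inr (Or.inr (Or.inr (Or.inr (Or.inr (Or.inr (Or.inr (Or.inr (Or.inr (Or.inr (Or.inr (Or.inr (Or.inr (Or.inr (Or.inr (Or.inr (Or.inr (Or.inr (Or.inr (Or.inr (Or.inr (Or.inr (Or.inl h)))))))))))))))))))))))))))),
      Or.inr (Or.inr (Or.inr (Or.inr (Or.inr (Or.inr (Or.inr (Or.inr (Or.inr (Or.inr (Or.inr (Or.inr (Or.inr (Or.inr (Or.inr (Or.inr (Or.inr (Or.inr (Or.inr (Or.inr (Or.inr (Or.inr (Or.inr (Or.inr (Or.inr (Or.inr (Or.inr (Or.inr (Or.inr (h))))))))))))))))))))))))))))),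
      Or.inr (Or.inr (Or.inr (Or.inr (Or.inr (Or.inr (Or.inl h)))))),
      Or.inr (Or.inr (Or.inr (Or.inr (Or.inr (Or.inr (Or.inr (Or.inr (Or.inl h)))))))),
      Or.inr (Or.inr (Or.inr (Or.inr (Or.inr (Or.inr (Or.inr (Or.inr (Or.inr (Or.inr (Or.inr (Or.inr (Or.inr (Or.inr (Or.inr (Or.inr (Or.inr (Or.inr (Or.inr (Or.inr (Or.inr (Or.inr (Or.inl h)))))))))))))))))))))),
      Or.inr (Or.inr (Or.inr (Or.inr (Or.inr (Or.inr (Or.inr (Or.inr (Or.inr (Or.inr (Or.inr (Or.inr (Or.inr (Or.inr (Or.inr (Or.inr (Or.inr (Or.inr (Or.inr (Or.inr (Or.inr (Or.inr (Or.inr (Or.inr (Or.inr (Or.inr (Or.inl h))))))))))))))))))))))))))]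

-- ===== VERDICT (by name: the statement is the Claim_ definition above) =====
theorem has_configurable_ports_spec : Claim_equal_has_configurable_ports := by
  intro m _
  exact pv_main m
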